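-- pv_equiv track=rewrite | github.com/dengsauve/advent-of-code-2025 | day06.py | parse_input_to_grid
-- ===== SOURCE A (Python) =====
-- def parse_input_to_grid(input, column_lengths):
--     grid = [[] for _ in input]
--     start = 0
--     for l in column_lengths:
--         end = start + l
--         for idx, row in enumerate(input):
--             target = row[start:end]
--             grid[idx].append(target)
--         start = end + 1
--
--     return grid
-- ===== SOURCE B (Python) =====
-- def parse_input_to_grid(input, column_lengths):
--     # Stream-consumption: each row is read once through an iterator, taking
--     # l characters per column and discarding one separator character between
--     # columns; no slice offsets are computed.
--     grid = []
--     for row in input: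
--         it = iter(row)
--         fields = []
--         for l in column_lengths:
--             taken = []
--             n = l
--             while n > 0:
--                 c = next(it, None)
--                 if c is None:
--                     break
--                 taken.append(c)
--                 n -= 1
--             next(it, None)  # skip the one-character separator
--             fields.append(''.join(taken))
--         grid.append(fields)
--     return grid
-- ===== Notes on version B (the rewrite author's own statement) =====
-- stated objective: alternative
-- what changed: B reads each row once as a character stream (an iterator), taking l characters per column and discarding one separator character between columns, instead of A's column-first loop that slices every row at a running start:end offset.
-- outside the precondition, e.g. on parse_input_to_grid(['abcdef'], [-5, 2]): A returns [['a', 'cd']], B returns [['', 'bc']]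
import Mathlib
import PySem

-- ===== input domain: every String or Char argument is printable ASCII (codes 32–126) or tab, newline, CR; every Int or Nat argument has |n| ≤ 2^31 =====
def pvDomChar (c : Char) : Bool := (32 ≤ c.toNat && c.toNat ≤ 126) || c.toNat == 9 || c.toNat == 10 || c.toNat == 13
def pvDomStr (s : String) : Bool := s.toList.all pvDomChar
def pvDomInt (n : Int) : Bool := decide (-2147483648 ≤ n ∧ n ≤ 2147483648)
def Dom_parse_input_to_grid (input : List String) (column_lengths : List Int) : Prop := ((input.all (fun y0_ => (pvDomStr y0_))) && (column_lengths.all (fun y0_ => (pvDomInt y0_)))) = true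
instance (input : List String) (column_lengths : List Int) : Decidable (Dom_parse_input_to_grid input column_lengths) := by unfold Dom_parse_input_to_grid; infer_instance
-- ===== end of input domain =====

-- B reads every row once as a character stream (take l chars, skip one separator) instead of
-- slicing rows at computed offsets; same cost, a different (stream-consumption) algorithm.

-- ===== PORT A =====
def pvAstep (input : List String) (st : List (List String) × Int) (l : Int) :
    List (List String) × Int :=
  let e := st.2 + l
  (List.zipWith (fun g row => g ++ [PySem.Str.slice row (some st.2) (some e)]) st.1 input,
   e + 1)

def parse_input_to_grid (input : List String) (column_lengths : List Int) : List (List String) :=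
  (column_lengths.foldl (pvAstep input) (input.map (fun _ => ([] : List String)), 0)).1

-- ===== PORT B =====
-- while n > 0: c = next(it, None); if c is None: break; taken.append(c); n -= 1
-- returns (taken, remaining iterator contents)
def pvTakeChars (it : List Char) (n : Int) : List Char × List Char :=
  if 0 < n then
    match it with
    | [] => ([], [])
    | c :: rest =>
        let p := pvTakeChars rest (n - 1)
        (c :: p.1, p.2)
  else ([], it)

-- one column step of B's inner loop: take l chars, skip the separator, append the field
def pvBstep (st : List Char × List String) (l : Int) : List Char × List String :=
  let p := pvTakeChars st.1 l
  (p.2.tail, st.2 ++ [String.ofList p.1])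

def parse_input_to_grid_alt (input : List String) (column_lengths : List Int) : List (List String) :=
  input.foldl
    (fun grid row => grid ++ [(column_lengths.foldl pvBstep (row.toList, [])).2])
    []

-- ===== PRECONDITION & SPEC =====
-- Pre_ restricts column_lengths to nonnegative widths, the task's natural domain: on a negative
-- width A's running offset can go negative and A then returns slices taken by Python's
-- negative-index wraparound, which B's stream consumption does not reproduce.
def Pre_parse_input_to_grid (input : List String) (column_lengths : List Int) : Prop :=
  ∀ l ∈ column_lengths, 0 ≤ l
instance (input : List String) (column_lengths : List Int) : Decidable (Pre_parse_input_to_grid input column_lengths) := by unfold Pre_parse_input_to_grid; infer_instance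

def pvWitness_parse_input_to_grid : List String × List Int := (["ab cd", "ef gh"], [2, 2])

def Spec_parse_input_to_grid (input : List String) (column_lengths : List Int) (out : List (List String)) : Prop := out = parse_input_to_grid_alt input column_lengths
instance (input : List String) (column_lengths : List Int) (out : List (List String)) : Decidable (Spec_parse_input_to_grid input column_lengths out) := by unfold Spec_parse_input_to_grid; infer_instance

-- ===== CLAIM (what is proved, stated in full; the proofs are below) =====
def Claim_equal_parse_input_to_grid : Prop := ∀ (input : List String) (column_lengths : List Int), Dom_parse_input_to_grid input column_lengths → Pre_parse_input_to_grid input column_lengths → Spec_parse_input_to_grid input column_lengths (parse_input_to_grid input column_lengths)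

-- ===== LEMMAS AND PROOFS =====
-- recursive characterisation of A's column boundaries
def pvBo (cls : List Int) (start : Int) : List (Int × Int) :=
  match cls with
  | [] => []
  | l :: rest => (start, start + l) :: pvBo rest (start + l + 1)

-- recursive characterisation of the fields both programs produce (chars = remaining row suffix)
def pvFields (chars : List Char) (cls : List Int) : List String :=
  match cls with
  | [] => []
  | l :: rest => String.ofList (chars.take l.toNat) :: pvFields ((chars.drop l.toNat).tail) rest

theorem pvTakeChars_eq (it : List Char) : ∀ n : Int,
    pvTakeChars it n = (it.take n.toNat, it.drop n.toNat) := by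
  induction it with
  | nil => intro n; unfold pvTakeChars; split_ifs <;> simp
  | cons c rest ih =>
      intro n
      unfold pvTakeChars
      split_ifs with h
      · have hn : n.toNat = (n - 1).toNat + 1 := by omega
        show (c :: (pvTakeChars rest (n - 1)).1, (pvTakeChars rest (n - 1)).2)
            = (List.take n.toNat (c :: rest), List.drop n.toNat (c :: rest))
        rw [ih (n - 1), hn]
        simp
      · have hn : n.toNat = 0 := by omega
        simp [hn]

theorem pv_foldB (cls : List Int) : ∀ (chars : List Char) (acc : List String),
    (cls.foldl pvBstep (chars, acc)).2 = acc ++ pvFields chars cls := by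
  induction cls with
  | nil => intro chars acc; simp [pvFields]
  | cons l rest ih =>
      intro chars acc
      simp only [List.foldl, pvBstep, pvTakeChars_eq, pvFields, ih]
      simp

theorem pv_zip_id (acc : List (List String)) :
    ∀ (input : List String), acc.length ≤ input.length →
      List.zipWith (fun (g : List String) (_ : String) => g) acc input = acc := by
  induction acc with
  | nil => intro input _; simp
  | cons a acc ih =>
      intro input h
      cases input with
      | nil => simp at h
      | cons r rs => simp at h ⊢; exact ih rs h

theorem pv_zip_append (acc : List (List String)) :
    ∀ (input : List String) (u v : String → List String),
      List.zipWith (fun g r => g ++ v r)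
        (List.zipWith (fun g r => g ++ u r) acc input) input
      = List.zipWith (fun g r => g ++ (u r ++ v r)) acc input := by
  induction acc with
  | nil => intro input u v; simp
  | cons a acc ih =>
      intro input u v
      cases input with
      | nil => simp
      | cons r rs => simp [ih]

theorem pv_foldA (input : List String) (cls : List Int) :
    ∀ (acc : List (List String)) (start : Int), acc.length = input.length →
      (cls.foldl (pvAstep input) (acc, start)).1
        = List.zipWith
            (fun g row => g ++ (pvBo cls start).map
              (fun se => PySem.Str.slice row (some se.1) (some se.2))) acc input := by
  induction cls with
  | nil =>
      intro acc start h
      simp [pvBo]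
      exact (pv_zip_id acc input (le_of_eq h)).symm
  | cons l rest ih =>
      intro acc start h
      have hlen : (List.zipWith
          (fun g row => g ++ [PySem.Str.slice row (some start) (some (start + l))])
          acc input).length = input.length := by
        simp [h]
      calc (List.foldl (pvAstep input) (acc, start) (l :: rest)).1
          = (rest.foldl (pvAstep input)
              (List.zipWith
                (fun g row => g ++ [PySem.Str.slice row (some start) (some (start + l))])
                acc input, start + l + 1)).1 := by
            simp [List.foldl, pvAstep]
        _ = _ := by
            rw [ih _ _ hlen, pv_zip_append]
            simp [pvBo]

theorem pv_zip_map_nil (input : List String) (f : String → List String) :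
    List.zipWith (fun (g : List String) r => g ++ f r)
      (List.replicate input.length ([] : List String)) input = input.map f := by
  induction input with
  | nil => simp
  | cons r rs ih => simp [List.replicate_succ, ih]

-- bridge: A's boundary slices of a row equal B's stream fields of the corresponding row suffix
theorem pv_bo_fields (cls : List Int) : ∀ (row : String) (start : Int), 0 ≤ start →
    (∀ l ∈ cls, 0 ≤ l) →
    (pvBo cls start).map (fun se => PySem.Str.slice row (some se.1) (some se.2))
      = pvFields (row.toList.drop start.toNat) cls := by
  induction cls with
  | nil => intro row start _ _; simp [pvBo, pvFields]
  | cons l rest ih =>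
      intro row start hs hcls
      have hl : 0 ≤ l := hcls l (List.mem_cons_self ..)
      have hrest : ∀ l' ∈ rest, 0 ≤ l' := fun l' h => hcls l' (List.mem_cons_of_mem _ h)
      simp only [pvBo, List.map, pvFields]
      congr 1
      · -- head field
        show PySem.Str.slice row (some start) (some (start + l))
            = String.ofList ((row.toList.drop start.toNat).take l.toNat)
        have h1 : (start + l).toNat - start.toNat = l.toNat := by omega
        simp [PySem.Str.slice, PySem.Chars.slice_eq_listSlice,
              PySem.List.slice_toNat _ hs (by omega : (0:Int) ≤ start + l), h1]
      · -- tail fields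
        rw [ih row (start + l + 1) (by omega) hrest]
        have h2 : ((row.toList.drop start.toNat).drop l.toNat).tail
            = row.toList.drop ((start + l + 1).toNat) := by
          rw [List.drop_drop, List.tail_drop]
          congr 1
          omega
        rw [h2]

-- ===== VERDICT (by name: the statement is the Claim_ definition above) =====
theorem parse_input_to_grid_spec : Claim_equal_parse_input_to_grid := by
  intro input cls _ hpre
  unfold Spec_parse_input_to_grid parse_input_to_grid parse_input_to_grid_alt
  rw [pv_foldA input cls _ 0 (by simp)]
  rw [PySem.List.foldl_append_singleton_eq_map]
  have hfields : ∀ row : String,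
      (pvBo cls 0).map (fun se => PySem.Str.slice row (some se.1) (some se.2))
        = pvFields row.toList cls := by
    intro row
    have := pv_bo_fields cls row 0 le_rfl hpre
    simpa using this
  have hB : ∀ row : String, (cls.foldl pvBstep (row.toList, [])).2 = pvFields row.toList cls := by
    intro row
    simpa using pv_foldB cls row.toList []
  simp only [hfields, hB]
  rw [show (input.map (fun _ => ([] : List String))) = List.replicate input.length [] by
        simp [List.map_const']]
  rw [pv_zip_map_nil]
  simp
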